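-- pv_equiv track=rewrite | github.com/nowChae/algorithm | 백준/Silver/3986. 좋은 단어/좋은 단어.py | good_word
-- ===== SOURCE A (Python) =====
-- def good_word(word):
--     stack = []
--
--
--
--     for w in word:
--         if len(stack) == 0:
--             stack.append(w)
--         else:
--             if stack[-1] == w:
--                 stack.pop()
--             else:
--                 stack.append(w)
--
--     if len(stack):
--         return False
--
--     return True
-- ===== SOURCE B (Python) =====
-- def _one_pass(s):
--     out = []
--     i = 0
--     while i < len(s):
--         if i + 1 < len(s) and s[i] == s[i + 1]:
--             i += 2
--         else:
--             out.append(s[i])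
--             i += 1
--     return out
--
--
-- def good_word(word):
--     cur = list(word)
--     while True:
--         nxt = _one_pass(cur)
--         if nxt == cur:
--             return len(cur) == 0
--         cur = nxt
-- ===== Notes on version B (the rewrite author's own statement) =====
-- stated objective: alternative
-- what changed: Replaces the single stack pass by repeated left-to-right scans that delete adjacent equal character pairs until a scan removes nothing, then tests emptiness; correctness rests on the uniqueness of the pair-cancellation normal form.
import Mathlib
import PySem

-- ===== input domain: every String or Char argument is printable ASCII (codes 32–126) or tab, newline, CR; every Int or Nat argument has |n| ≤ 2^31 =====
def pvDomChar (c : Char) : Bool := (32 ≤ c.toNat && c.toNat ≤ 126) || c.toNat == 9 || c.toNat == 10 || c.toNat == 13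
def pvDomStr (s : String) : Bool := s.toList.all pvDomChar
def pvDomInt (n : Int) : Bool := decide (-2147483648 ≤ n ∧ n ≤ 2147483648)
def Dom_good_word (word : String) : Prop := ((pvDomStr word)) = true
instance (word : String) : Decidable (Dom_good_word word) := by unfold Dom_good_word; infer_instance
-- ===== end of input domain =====

-- B replaces the single stack pass by repeated scans deleting adjacent equal pairs until a
-- scan removes nothing (objective: alternative decomposition; same results, not faster).

-- ===== PORT A =====
-- one iteration of A's for-loop body (stack top at the END of the list, like Python's append/pop)
def goodStep (stack : List Char) (w : Char) : List Char :=
  if stack.length = 0 then stack ++ [w]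
  else if stack.getLast! = w then stack.dropLast
  else stack ++ [w]

def good_word (word : String) : Bool :=
  let stack := word.toList.foldl goodStep []
  if stack.length ≠ 0 then false else true

-- ===== PORT B =====
-- Source B's _one_pass: walk left to right, skipping a character together with an equal immediate neighbour
def onePass : List Char → List Char
  | [] => []
  | [a] => [a]
  | a :: b :: rest => if a = b then onePass rest else a :: onePass (b :: rest)
termination_by l => l.length

theorem onePass_length_le : ∀ l : List Char, (onePass l).length ≤ l.length
  | [] => by simp [onePass]
  | [a] => by simp [onePass]
  | a :: b :: rest => by
    unfold onePass
    by_cases hab : a = b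
    · rw [if_pos hab]
      have := onePass_length_le rest
      simp; omega
    · rw [if_neg hab]
      have := onePass_length_le (b :: rest)
      simp at this ⊢; omega
termination_by l => l.length

theorem onePass_progress : ∀ l : List Char, onePass l ≠ l → (onePass l).length < l.length
  | [] => by simp [onePass]
  | [a] => by simp [onePass]
  | a :: b :: rest => by
    intro h
    unfold onePass at h ⊢
    by_cases hab : a = b
    · rw [if_pos hab]
      have := onePass_length_le rest; simp; omega
    · rw [if_neg hab] at h ⊢
      have h' : onePass (b :: rest) ≠ b :: rest := by
        intro he; exact h (by simp [he])
      have := onePass_progress (b :: rest) h'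
      simpa using Nat.succ_lt_succ this
termination_by l => l.length

-- Source B's while-True loop: repeat onePass until it changes nothing
def reduceFix (l : List Char) : List Char :=
  if h : onePass l = l then l else reduceFix (onePass l)
termination_by l.length
decreasing_by exact onePass_progress l h

def good_word_alt (word : String) : Bool :=
  (reduceFix word.toList).length = 0

-- ===== PRECONDITION & SPEC =====
def Spec_good_word (word : String) (out : Bool) : Prop := out = good_word_alt word
instance (word : String) (out : Bool) : Decidable (Spec_good_word word out) := by unfold Spec_good_word; infer_instance

-- ===== CLAIM (what is proved, stated in full; the proofs are below) =====
def Claim_equal_good_word : Prop := ∀ (word : String), Dom_good_word word → Spec_good_word word (good_word word)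

-- ===== LEMMAS AND PROOFS =====

-- abstract stack machine with the top at the HEAD (A's stack reversed)
def stepR (st : List Char) (w : Char) : List Char :=
  match st with
  | [] => [w]
  | t :: r => if t = w then r else w :: t :: r

def runStack (st : List Char) : List Char → List Char
  | [] => st
  | w :: ws => runStack (stepR st w) ws

theorem getLast!_concat (xs : List Char) (t : Char) : (xs ++ [t]).getLast! = t := by
  induction xs with
  | nil => rfl
  | cons a as ih => cases as <;> simp_all [List.getLast!]

-- A's loop is runStack with the stack reversed
theorem goodStep_eq_stepR (st : List Char) (w : Char) :
    goodStep st.reverse w = (stepR st w).reverse := by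
  cases st with
  | nil => simp [goodStep, stepR]
  | cons t r =>
    simp only [goodStep, stepR, List.reverse_cons]
    have hlen : ¬ (r.reverse ++ [t]).length = 0 := by simp
    rw [if_neg hlen, getLast!_concat]
    by_cases h : t = w
    · simp [h]
    · rw [if_neg h, if_neg h]; simp

theorem foldl_goodStep (ws : List Char) : ∀ st : List Char,
    List.foldl goodStep st.reverse ws = (runStack st ws).reverse := by
  induction ws with
  | nil => intro st; simp [runStack]
  | cons w ws ih =>
    intro st
    simp only [List.foldl_cons, runStack, goodStep_eq_stepR]
    exact ih (stepR st w)

def Irred (l : List Char) : Prop := List.IsChain (· ≠ ·) l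

theorem irred_stepR {st : List Char} (h : Irred st) (w : Char) : Irred (stepR st w) := by
  cases st with
  | nil => exact List.isChain_singleton w
  | cons t r =>
    by_cases he : t = w
    · simpa [stepR, he, Irred] using h.tail
    · simpa [stepR, he, Irred, List.isChain_cons_cons] using ⟨Ne.symm he, h⟩

-- popping an adjacent equal pair is invisible to the stack machine (for irreducible stacks)
theorem run_pair {st : List Char} (h : Irred st) (a : Char) (ws : List Char) :
    runStack st (a :: a :: ws) = runStack st ws := by
  cases st with
  | nil => simp [runStack, stepR]
  | cons t r =>
    by_cases hta : t = a
    · subst hta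
      cases r with
      | nil => simp [runStack, stepR]
      | cons u rr =>
        have hut : u ≠ t := (List.isChain_cons_cons.mp h).1.symm
        simp [runStack, stepR, if_neg hut]
    · simp [runStack, stepR, if_neg hta]

theorem run_onePass : ∀ (ws : List Char) (st : List Char), Irred st →
    runStack st (onePass ws) = runStack st ws
  | [], _, _ => by simp [onePass]
  | [a], _, _ => by simp [onePass]
  | a :: b :: rest, st, h => by
    unfold onePass
    by_cases hab : a = b
    · subst hab
      rw [if_pos rfl, run_onePass rest st h, run_pair h]
    · rw [if_neg hab]
      show runStack (stepR st a) (onePass (b :: rest)) = runStack (stepR st a) (b :: rest)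
      exact run_onePass (b :: rest) (stepR st a) (irred_stepR h a)
termination_by ws => ws.length

-- a fixed point of onePass has no adjacent equal pair
theorem fix_irred : ∀ l : List Char, onePass l = l → Irred l
  | [] => fun _ => List.isChain_nil
  | [a] => fun _ => List.isChain_singleton a
  | a :: b :: rest => by
    intro h
    unfold onePass at h
    by_cases hab : a = b
    · rw [if_pos hab] at h
      have h1 := onePass_length_le rest
      have h2 : (onePass rest).length = rest.length + 2 := by rw [h]; simp
      omega
    · rw [if_neg hab] at h
      have h' : onePass (b :: rest) = b :: rest := by
        simpa using h
      exact List.isChain_cons_cons.mpr ⟨hab, fix_irred (b :: rest) h'⟩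
termination_by l => l.length

-- the stack machine leaves an irreducible word (whose head differs from the stack top) untouched
theorem run_irred : ∀ (ws st : List Char), Irred ws →
    (∀ t w, st.head? = some t → ws.head? = some w → t ≠ w) →
    runStack st ws = ws.reverse ++ st
  | [], st, _, _ => by simp [runStack]
  | a :: rest, st, h, hh => by
    have hstep : stepR st a = a :: st := by
      cases st with
      | nil => rfl
      | cons t r =>
        have : t ≠ a := hh t a rfl rfl
        simp [stepR, if_neg this]
    show runStack (stepR st a) rest = (a :: rest).reverse ++ st
    rw [hstep]
    have := run_irred rest (a :: st) h.tail (by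
      intro t w ht hw
      cases rest with
      | nil => simp at hw
      | cons b rr =>
        simp at ht hw
        subst ht; subst hw
        exact (List.isChain_cons_cons.mp h).1)
    rw [this]; simp

theorem reduceFix_fix (l : List Char) : onePass (reduceFix l) = reduceFix l := by
  unfold reduceFix
  split
  · assumption
  · exact reduceFix_fix _
termination_by l.length
decreasing_by exact onePass_progress l (by assumption)

theorem run_reduceFix (l : List Char) : runStack [] (reduceFix l) = runStack [] l := by
  unfold reduceFix
  split
  · rfl
  · rw [run_reduceFix (onePass l), run_onePass l [] List.isChain_nil]
termination_by l.length
decreasing_by exact onePass_progress l (by assumption)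

theorem run_eq_nf (l : List Char) : runStack [] l = (reduceFix l).reverse := by
  rw [← run_reduceFix l,
    run_irred (reduceFix l) [] (fix_irred _ (reduceFix_fix l)) (by intro t w ht; simp at ht)]
  simp

-- ===== VERDICT (by name: the statement is the Claim_ definition above) =====
theorem good_word_spec : Claim_equal_good_word := by
  intro word _
  unfold Spec_good_word good_word good_word_alt
  have h : List.foldl goodStep [] word.toList = (runStack [] word.toList).reverse := by
    simpa using foldl_goodStep word.toList []
  rw [h, run_eq_nf]
  simp only [List.reverse_reverse]
  by_cases he : (reduceFix word.toList).length = 0 <;> simp [he]
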